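-- pv_equiv track=rewrite | github.com/Utkarsh4430/steerduplex | src/eval/voicebench/eval.py | _build_worker_assignments
-- ===== SOURCE A (Python) =====
-- from typing import Any, Dict, List, Optional, Tuple
--
-- def _build_worker_assignments(
--     devices: List[str], instances_per_gpu: int
-- ) -> List[Tuple[int, str]]:
--     """Return list of (worker_id, device_str); length = len(devices) * instances_per_gpu."""
--     assignments: List[Tuple[int, str]] = []
--     wid = 0
--     for device in devices:
--         for _ in range(instances_per_gpu):
--             assignments.append((wid, device))
--             wid += 1
--     return assignments
-- ===== SOURCE B (Python) =====
-- def _build_worker_assignments(devices, instances_per_gpu):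
--     total = len(devices) * instances_per_gpu
--     return [(wid, devices[wid // instances_per_gpu]) for wid in range(total)]
-- ===== Notes on version B (the rewrite author's own statement) =====
-- stated objective: simpler
-- what changed: Replaced the nested device/instance loops with a running counter by a single comprehension over the flat worker-id range, recovering each device by integer division wid // instances_per_gpu.
import Mathlib
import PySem

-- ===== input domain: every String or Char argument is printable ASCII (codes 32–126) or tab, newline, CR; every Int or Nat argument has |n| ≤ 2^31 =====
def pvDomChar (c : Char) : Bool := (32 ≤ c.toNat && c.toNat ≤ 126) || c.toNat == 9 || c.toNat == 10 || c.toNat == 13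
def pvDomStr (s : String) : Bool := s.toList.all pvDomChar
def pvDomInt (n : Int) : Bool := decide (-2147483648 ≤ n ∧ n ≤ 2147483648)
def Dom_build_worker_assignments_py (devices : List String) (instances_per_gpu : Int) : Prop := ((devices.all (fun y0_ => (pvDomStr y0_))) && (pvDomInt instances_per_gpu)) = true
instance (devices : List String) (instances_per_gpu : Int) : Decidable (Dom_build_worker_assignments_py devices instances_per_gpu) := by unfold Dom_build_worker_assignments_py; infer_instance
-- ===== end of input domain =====

-- B replaces A's nested loops and running counter by one pass over the flat worker-id
-- range, recovering the device by integer division (objective: simpler).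

-- ===== PORT A =====
-- nested loops: for device in devices: for _ in range(instances_per_gpu): append (wid, device); wid += 1
def build_worker_assignments_py (devices : List String) (instances_per_gpu : Int) : List (Int × String) :=
  (devices.foldl
    (fun (st : List (Int × String) × Int) device =>
      (PySem.List.pyRange 0 instances_per_gpu 1).foldl
        (fun (st2 : List (Int × String) × Int) _ => (st2.1 ++ [(st2.2, device)], st2.2 + 1)) st)
    ([], 0)).1

-- ===== PORT B =====
-- [(wid, devices[wid // instances_per_gpu]) for wid in range(len(devices) * instances_per_gpu)]
-- pyGetD with default "": every index reached by the comprehension is in range in Python, so this is exact.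
def build_worker_assignments_py_alt (devices : List String) (instances_per_gpu : Int) : List (Int × String) :=
  (PySem.List.pyRange 0 ((devices.length : Int) * instances_per_gpu) 1).map
    (fun wid => (wid, PySem.List.pyGetD devices (PySem.Int.floordiv wid instances_per_gpu) ""))

-- ===== PRECONDITION & SPEC =====
def Spec_build_worker_assignments_py (devices : List String) (instances_per_gpu : Int) (out : List (Int × String)) : Prop := out = build_worker_assignments_py_alt devices instances_per_gpu
instance (devices : List String) (instances_per_gpu : Int) (out : List (Int × String)) : Decidable (Spec_build_worker_assignments_py devices instances_per_gpu out) := by unfold Spec_build_worker_assignments_py; infer_instance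

-- ===== CLAIM (what is proved, stated in full; the proofs are below) =====
def Claim_equal_build_worker_assignments_py : Prop := ∀ (devices : List String) (instances_per_gpu : Int), Dom_build_worker_assignments_py devices instances_per_gpu → Spec_build_worker_assignments_py devices instances_per_gpu (build_worker_assignments_py devices instances_per_gpu)

-- ===== LEMMAS AND PROOFS =====

-- canonical shape both programs produce: for each device, a block of n consecutive ids
def pvCanon (ds : List String) (n : Nat) (w : Int) : List (Int × String) :=
  match ds with
  | [] => []
  | d :: ds' => (List.range n).map (fun (j : Nat) => (w + (j : Int), d)) ++ pvCanon ds' n (w + (n : Int))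

-- A's inner loop ignores the range elements: only the length matters
lemma pv_inner (l : List Int) (d : String) (acc : List (Int × String)) (w : Int) :
    l.foldl (fun (st2 : List (Int × String) × Int) _ => (st2.1 ++ [(st2.2, d)], st2.2 + 1)) (acc, w)
      = (acc ++ (List.range l.length).map (fun (j : Nat) => (w + (j : Int), d)), w + (l.length : Int)) := by
  induction l generalizing acc w with
  | nil => simp
  | cons x xs ih =>
      rw [List.foldl_cons, ih]
      refine Prod.ext ?_ ?_
      · show acc ++ [(w, d)] ++ _ = acc ++ _
        rw [List.append_assoc]
        congr 1
        rw [List.length_cons, List.range_succ_eq_map, List.map_cons, List.map_map,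
          List.singleton_append]
        congr 1
        · norm_num
        · apply List.map_congr_left
          intro j _
          simp only [Function.comp]
          refine Prod.ext ?_ rfl
          push_cast; ring
      · simp only [List.length_cons]; push_cast; ring

-- A's outer loop builds pvCanon
lemma pv_aLoop (n : Nat) (ds : List String) (acc : List (Int × String)) (w : Int) :
    ds.foldl
      (fun (st : List (Int × String) × Int) device =>
        (PySem.List.pyRange 0 (n : Int) 1).foldl
          (fun (st2 : List (Int × String) × Int) _ => (st2.1 ++ [(st2.2, device)], st2.2 + 1)) st)
      (acc, w)
      = (acc ++ pvCanon ds n w, w + (ds.length : Int) * (n : Int)) := by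
  induction ds generalizing acc w with
  | nil => simp [pvCanon]
  | cons d ds' ih =>
      have hlen : (PySem.List.pyRange 0 (n : Int) 1).length = n := by
        simp [PySem.List.length_pyRange_one]
      simp only [List.foldl_cons, pv_inner, hlen, ih, pvCanon]
      refine Prod.ext (by simp) ?_
      simp only [List.length_cons]; push_cast; ring

-- closed form of pvCanon: the flat range with integer division
lemma pv_canon_eq (ds : List String) (n : Nat) (hn : 0 < n) (w : Int) :
    pvCanon ds n w
      = (List.range (ds.length * n)).map (fun (k : Nat) => (w + (k : Int), ds.getD (k / n) "")) := by
  induction ds generalizing w with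
  | nil => simp [pvCanon]
  | cons d ds' ih =>
      simp only [pvCanon, List.length_cons]
      rw [show (ds'.length + 1) * n = n + ds'.length * n by ring, List.range_add, List.map_append]
      congr 1
      · apply List.map_congr_left
        intro k hk
        have hk' : k < n := List.mem_range.mp hk
        simp [Nat.div_eq_of_lt hk']
      · rw [ih (w + (n : Int)), List.map_map]
        apply List.map_congr_left
        intro k _
        have hdiv : (n + k) / n = k / n + 1 := by
          rw [Nat.add_comm, Nat.add_div_right _ hn]
        simp only [Function.comp, hdiv]
        refine Prod.ext ?_ rfl
        push_cast; ring

-- ===== VERDICT (by name: the statement is the Claim_ definition above) =====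
theorem build_worker_assignments_py_spec : Claim_equal_build_worker_assignments_py := by
  intro devices ipg _
  show build_worker_assignments_py devices ipg = build_worker_assignments_py_alt devices ipg
  by_cases hpos : 0 < ipg
  · -- positive instances_per_gpu: both sides are pvCanon
    set n : Nat := ipg.toNat with hn
    have hcast : (n : Int) = ipg := Int.toNat_of_nonneg (le_of_lt hpos)
    have hnpos : 0 < n := by omega
    have hA : build_worker_assignments_py devices ipg = pvCanon devices n 0 := by
      unfold build_worker_assignments_py
      rw [← hcast, pv_aLoop n devices [] 0]
      simp
    have hB : build_worker_assignments_py_alt devices ipg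
        = (List.range (devices.length * n)).map
            (fun (k : Nat) => ((k : Int), devices.getD (k / n) "")) := by
      unfold build_worker_assignments_py_alt
      rw [← hcast, PySem.List.pyRange_one]
      have htot : (((devices.length : Int)) * (n : Int) - 0).toNat = devices.length * n := by
        omega
      rw [htot, List.map_map]
      apply List.map_congr_left
      intro k _
      simp only [Function.comp, zero_add]
      rw [PySem.Int.floordiv_natCast, PySem.List.pyGetD_natCast]
    rw [hA, hB, pv_canon_eq devices n hnpos 0]
    apply List.map_congr_left
    intro k _
    simp
  · -- instances_per_gpu ≤ 0: both sides are empty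
    have hle : ipg ≤ 0 := by omega
    have hA : build_worker_assignments_py devices ipg = [] := by
      unfold build_worker_assignments_py
      rw [PySem.List.pyRange_one_eq_nil hle]
      induction devices with
      | nil => simp
      | cons d ds ih => simp
    have hB : build_worker_assignments_py_alt devices ipg = [] := by
      unfold build_worker_assignments_py_alt
      rw [PySem.List.pyRange_one_eq_nil (by
        have h0 : (0 : Int) ≤ (devices.length : Int) := by positivity
        nlinarith)]
      rfl
    rw [hA, hB]
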